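-- pv_equiv track=rewrite | github.com/wiebe-xyz/github-tamagotchi | src/github_tamagotchi/services/badge.py | _showcase_positions
-- ===== SOURCE A (Python) =====
-- import math
--
-- _CARD_W = 90
--
-- _CARD_H = 72
--
-- _CARD_GAP = 6
--
-- _CARD_PAD = 8
--
-- def _showcase_positions(n: int, layout: str) -> tuple[list[tuple[int, int]], int, int]:
--     """Compute (x, y) card positions and total (width, height) for a given layout."""
--     if layout == "vertical":
--         cols, rows = 1, n
--     elif layout == "grid":
--         cols = min(n, 3)
--         rows = math.ceil(n / cols)
--     else:  # horizontal
--         cols, rows = n, 1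
--
--     total_w = _CARD_PAD + cols * (_CARD_W + _CARD_GAP) - _CARD_GAP + _CARD_PAD
--     total_h = _CARD_PAD + rows * (_CARD_H + _CARD_GAP) - _CARD_GAP + _CARD_PAD
--
--     positions: list[tuple[int, int]] = []
--     for i in range(n):
--         col = i % cols
--         row = i // cols
--         px = _CARD_PAD + col * (_CARD_W + _CARD_GAP)
--         py = _CARD_PAD + row * (_CARD_H + _CARD_GAP)
--         positions.append((px, py))
--
--     return positions, total_w, total_h
-- ===== SOURCE B (Python) =====
-- import math
--
-- _CARD_W = 90
-- _CARD_H = 72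
-- _CARD_GAP = 6
-- _CARD_PAD = 8
--
--
-- def _showcase_positions(n: int, layout: str) -> tuple[list[tuple[int, int]], int, int]:
--     """Row-major grid comprehension truncated to n, instead of per-index divmod."""
--     if layout == "vertical":
--         cols, rows = 1, n
--     elif layout == "grid":
--         cols = min(n, 3)
--         rows = math.ceil(n / cols)
--     else:  # horizontal
--         cols, rows = n, 1
--
--     step_x = _CARD_W + _CARD_GAP
--     step_y = _CARD_H + _CARD_GAP
--     grid = [(_CARD_PAD + col * step_x, _CARD_PAD + row * step_y)
--             for row in range(rows) for col in range(cols)]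
--     return (grid[:n],
--             2 * _CARD_PAD + cols * step_x - _CARD_GAP,
--             2 * _CARD_PAD + rows * step_y - _CARD_GAP)
-- ===== Notes on version B (the rewrite author's own statement) =====
-- stated objective: alternative
-- what changed: B builds the positions as a row-major nested comprehension over rows x cols truncated to n, instead of A's flat index loop computing col/row by i % cols and i // cols.
import Mathlib
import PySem

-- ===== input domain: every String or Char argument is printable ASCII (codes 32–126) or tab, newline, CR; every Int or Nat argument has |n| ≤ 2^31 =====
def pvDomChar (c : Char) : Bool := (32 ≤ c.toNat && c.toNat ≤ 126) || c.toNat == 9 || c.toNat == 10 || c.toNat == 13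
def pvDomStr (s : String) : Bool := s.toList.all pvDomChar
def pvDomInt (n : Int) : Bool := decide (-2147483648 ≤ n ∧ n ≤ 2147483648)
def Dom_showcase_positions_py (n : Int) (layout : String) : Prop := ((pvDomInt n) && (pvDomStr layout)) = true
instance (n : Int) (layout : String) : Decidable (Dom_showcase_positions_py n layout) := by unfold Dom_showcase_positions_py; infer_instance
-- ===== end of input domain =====

-- B replaces A's flat index loop with divmod by a row-major nested comprehension truncated to n (objective: alternative decomposition, same cost).

-- ===== PORT A =====
-- math.ceil(n / cols) is ported as exact integer ceiling division -((-n) // cols);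
-- this is exact on the admitted domain (|n| ≤ 2^31 < 2^53, cols ∈ {1,2,3} for n > 0, cols = n for n < 0).
def showcase_positions_py (n : Int) (layout : String) : (List (Int × Int)) × Int × Int :=
  let cr : Int × Int :=
    if layout = "vertical" then (1, n)
    else if layout = "grid" then
      let cols := min n 3
      (cols, -(PySem.Int.floordiv (-n) cols))
    else (n, 1)
  let cols := cr.1
  let rows := cr.2
  let total_w := 8 + cols * (90 + 6) - 6 + 8
  let total_h := 8 + rows * (72 + 6) - 6 + 8
  let positions := (PySem.List.pyRange 0 n 1).foldl
    (fun acc i =>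
      acc ++ [(8 + PySem.Int.mod i cols * (90 + 6), 8 + PySem.Int.floordiv i cols * (72 + 6))]) []
  (positions, total_w, total_h)

-- ===== PORT B =====
def showcase_positions_py_alt (n : Int) (layout : String) : (List (Int × Int)) × Int × Int :=
  let cr : Int × Int :=
    if layout = "vertical" then (1, n)
    else if layout = "grid" then
      let cols := min n 3
      (cols, -(PySem.Int.floordiv (-n) cols))
    else (n, 1)
  let cols := cr.1
  let rows := cr.2
  let stepX : Int := 90 + 6
  let stepY : Int := 72 + 6
  let grid := (PySem.List.pyRange 0 rows 1).flatMap
    (fun row => (PySem.List.pyRange 0 cols 1).map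
      (fun col => (8 + col * stepX, 8 + row * stepY)))
  (PySem.List.slice grid none (some n),
   2 * 8 + cols * stepX - 6,
   2 * 8 + rows * stepY - 6)

-- ===== PRECONDITION & SPEC =====
-- Pre_ excludes only layout = "grid" with n = 0, where A raises ZeroDivisionError (cols = 0).
def Pre_showcase_positions_py (n : Int) (layout : String) : Prop := ¬ (layout = "grid" ∧ n = 0)
instance (n : Int) (layout : String) : Decidable (Pre_showcase_positions_py n layout) := by unfold Pre_showcase_positions_py; infer_instance
def pvWitness_showcase_positions_py : Int × String := (5, "grid")

def Spec_showcase_positions_py (n : Int) (layout : String) (out : (List (Int × Int)) × Int × Int) : Prop := out = showcase_positions_py_alt n layout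
instance (n : Int) (layout : String) (out : (List (Int × Int)) × Int × Int) : Decidable (Spec_showcase_positions_py n layout out) := by unfold Spec_showcase_positions_py; infer_instance

-- ===== CLAIM (what is proved, stated in full; the proofs are below) =====
def Claim_equal_showcase_positions_py : Prop := ∀ (n : Int) (layout : String), Dom_showcase_positions_py n layout → Pre_showcase_positions_py n layout → Spec_showcase_positions_py n layout (showcase_positions_py n layout)

-- ===== LEMMAS AND PROOFS =====

-- A row-major block of r rows × c columns, flattened, is the per-index divmod enumeration.
lemma pv_block_eq {α : Type} (f : ℕ → ℕ → α) (c : ℕ) :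
    ∀ r : ℕ, (List.range r).flatMap (fun row => (List.range c).map (f row))
      = (List.range (r * c)).map (fun i => f (i / c) (i % c)) := by
  intro r
  induction r with
  | zero => simp
  | succ r ih =>
    rw [List.range_succ, List.flatMap_append, ih, Nat.succ_mul, List.range_add,
      List.map_append]
    simp only [List.flatMap_cons, List.flatMap_nil, List.append_nil, List.map_map]
    congr 1
    apply List.map_congr_left
    intro j hj
    have hjc : j < c := List.mem_range.mp hj
    have hc : 0 < c := Nat.lt_of_le_of_lt (Nat.zero_le j) hjc
    have h1 : (r * c + j) / c = r := by
      rw [Nat.add_comm, Nat.add_mul_div_right _ _ hc, Nat.div_eq_of_lt hjc, Nat.zero_add]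
    have h2 : (r * c + j) % c = j := by
      rw [Nat.add_comm, Nat.add_mul_mod_self_right, Nat.mod_eq_of_lt hjc]
    simp only [Function.comp_apply]
    rw [h1, h2]

lemma pv_slice_nil {α : Type} (a b : Option Int) :
    PySem.List.slice ([] : List α) a b = [] := by
  cases a <;> cases b <;> simp [PySem.List.slice]

-- Core agreement of the two position computations, for cols > 0 and 0 ≤ n ≤ rows*cols.
lemma pv_core (cols rows n : Int) (hc : 0 < cols) (hn0 : 0 ≤ n) (hn : n ≤ rows * cols) :
    (PySem.List.pyRange 0 n 1).foldl
      (fun acc i =>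
        acc ++ [(8 + PySem.Int.mod i cols * (90 + 6), 8 + PySem.Int.floordiv i cols * (72 + 6))])
      ([] : List (Int × Int))
    = PySem.List.slice
        ((PySem.List.pyRange 0 rows 1).flatMap
          (fun row => (PySem.List.pyRange 0 cols 1).map
            (fun col => (8 + col * (90 + 6), 8 + row * (72 + 6)))))
        none (some n) := by
  have hr : 0 ≤ rows := by nlinarith
  rw [PySem.List.foldl_append_singleton_eq_map, PySem.List.slice_to _ hn0,
    PySem.List.pyRange_one 0 n, PySem.List.pyRange_one 0 rows, PySem.List.pyRange_one 0 cols]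
  simp only [List.nil_append, zero_add, Int.sub_zero, List.flatMap_map, List.map_map,
    Function.comp_def]
  rw [pv_block_eq (fun r c => ((8 + (c : Int) * (90 + 6), 8 + (r : Int) * (72 + 6)) : Int × Int))
    cols.toNat rows.toNat, ← List.map_take, List.take_range]
  have hle : n.toNat ≤ rows.toNat * cols.toNat := by
    have h1 : ((n.toNat : Int)) ≤ (rows.toNat : Int) * (cols.toNat : Int) := by
      rw [Int.toNat_of_nonneg hn0, Int.toNat_of_nonneg hr, Int.toNat_of_nonneg hc.le]
      exact hn
    exact_mod_cast h1
  rw [Nat.min_eq_left hle]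
  apply List.map_congr_left
  intro k _
  rw [PySem.Int.mod_eq_emod_of_pos hc, PySem.Int.floordiv_eq_ediv_of_pos hc]
  have e1 : ((k % cols.toNat : ℕ) : ℤ) = (k : ℤ) % cols := by
    push_cast [Int.toNat_of_nonneg hc.le]; rfl
  have e2 : ((k / cols.toNat : ℕ) : ℤ) = (k : ℤ) / cols := by
    push_cast [Int.toNat_of_nonneg hc.le]; rfl
  rw [e1, e2]

theorem showcase_positions_py_spec : Claim_equal_showcase_positions_py := by
  intro n layout _ hpre
  unfold Spec_showcase_positions_py showcase_positions_py showcase_positions_py_alt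
  dsimp only
  split_ifs with hv hg
  · -- vertical: cols = 1, rows = n
    dsimp only
    simp only [Prod.mk.injEq]
    refine ⟨?_, by ring, by ring⟩
    by_cases h : 0 ≤ n
    · exact pv_core 1 n n one_pos h (by omega)
    · rw [PySem.List.pyRange_one_eq_nil (show n ≤ (0 : Int) by omega)]
      simp [pv_slice_nil]
  · -- grid: cols = min n 3
    have hne : n ≠ 0 := fun h => hpre ⟨hg, h⟩
    dsimp only
    simp only [Prod.mk.injEq]
    refine ⟨?_, by ring, by ring⟩
    have hfm : ∀ L : List Int,
        List.flatMap (fun _ : Int => ([] : List (Int × Int))) L = [] := by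
      intro L; simp
    by_cases h : n < 0
    · -- n < 0: both position lists are empty
      have hmin : min n 3 = n := min_eq_left (by omega)
      rw [hmin, PySem.List.pyRange_one_eq_nil (show n ≤ (0 : Int) by omega)]
      simp only [List.map_nil, List.foldl_nil]
      rw [hfm, pv_slice_nil]
    · -- n > 0: cols = min n 3 ∈ {1,2,3}
      have hc : 0 < min n 3 := by omega
      rw [PySem.Int.floordiv_eq_ediv_of_pos hc]
      have h1 : (min n 3) * ((-n) / (min n 3)) + (-n) % (min n 3) = -n :=
        Int.mul_ediv_add_emod (-n) (min n 3)
      have h2 : 0 ≤ (-n) % (min n 3) := Int.emod_nonneg _ (ne_of_gt hc)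
      have h3 : (-((-n) / (min n 3))) * (min n 3) = n + (-n) % (min n 3) := by
        linear_combination -h1
      exact pv_core (min n 3) (-((-n) / (min n 3))) n hc (by omega) (by linarith)

  · -- horizontal: cols = n, rows = 1
    dsimp only
    simp only [Prod.mk.injEq]
    refine ⟨?_, by ring, by ring⟩
    have hfm : ∀ L : List Int,
        List.flatMap (fun _ : Int => ([] : List (Int × Int))) L = [] := by
      intro L; simp
    by_cases h : 0 < n
    · exact pv_core n 1 n h (le_of_lt h) (by omega)
    · rw [PySem.List.pyRange_one_eq_nil (show n ≤ (0 : Int) by omega)]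
      simp only [List.map_nil, List.foldl_nil]
      rw [hfm, pv_slice_nil]
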